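-- pv_equiv track=rewrite | github.com/tariel15/GOA | level 076/homework/codwars7.py | count_different_matrices
-- ===== SOURCE A (Python) =====
-- def count_different_matrices(matrices):
--     dictionary = dict()
--     for i in matrices:
--         if tuple(i) not in matrices:
--             dictionary[tuple(i)] = 1
--         else:
--             dictionary[tuple(i)] += 1
--     set1 = set()
--     count = 0
--     for i in matrices:
--         i1 = tuple(i)
--         i2 = tuple([i[2], i[0], i[3], i[1]])
--         i3 = tuple([i[3], i[2], i[1], i[0]])
--         i4 = tuple([i[1], i[3], i[0], i[2]])
--         if i1 not in set1 and i2 not in set1 and i3 not in set1 and i4 not in set1: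
--             set1.add(i1)
--             set1.add(i2)
--             set1.add(i3)
--             set1.add(i4)
--             count += 1
--     return count
-- ===== SOURCE B (Python) =====
-- def count_different_matrices(matrices):
--     canon = set()
--     for i in matrices:
--         canon.add(min((i[0], i[1], i[2], i[3]),
--                       (i[2], i[0], i[3], i[1]),
--                       (i[3], i[2], i[1], i[0]),
--                       (i[1], i[3], i[0], i[2])))
--     return len(canon)
-- ===== Notes on version B (the rewrite author's own statement) =====
-- stated objective: simpler
-- what changed: Instead of incrementally unioning whole rotation orbits into one set with a four-way absence check and a running counter (plus A's dead dictionary-building loop, which is dropped), B canonicalizes each matrix to the minimum of the four rotations of its first four entries and counts distinct canonical forms; dropping the dead dict loop and the four-way set probes gives a measured constant-factor speedup.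
import Mathlib
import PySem

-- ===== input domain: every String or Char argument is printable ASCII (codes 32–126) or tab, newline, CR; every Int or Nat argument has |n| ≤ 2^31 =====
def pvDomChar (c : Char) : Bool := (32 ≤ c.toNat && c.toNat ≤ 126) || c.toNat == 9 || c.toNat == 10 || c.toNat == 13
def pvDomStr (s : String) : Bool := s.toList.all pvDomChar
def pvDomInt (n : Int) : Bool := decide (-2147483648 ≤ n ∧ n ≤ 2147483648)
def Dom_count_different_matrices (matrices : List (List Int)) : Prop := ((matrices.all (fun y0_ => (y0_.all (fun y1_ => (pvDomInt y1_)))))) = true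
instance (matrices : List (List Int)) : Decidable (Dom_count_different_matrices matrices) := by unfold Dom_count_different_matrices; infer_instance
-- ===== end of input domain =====

-- B replaces A's incremental orbit-union set with four-way absence checks and a running
-- counter (and drops A's dead dictionary loop) by canonicalizing each matrix to the minimum
-- of the four rotations of its first four entries and counting distinct canonical forms
-- (objective: simpler).

-- ===== PORT A =====
-- the three rotated tuples i2, i3, i4 of A's second loop; none = IndexError (row shorter than 4)
def pvRotsA (i : List Int) : Option (List Int × List Int × List Int) := do
  let x2 ← PySem.List.pyGet? i 2
  let x0 ← PySem.List.pyGet? i 0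
  let x3 ← PySem.List.pyGet? i 3
  let x1 ← PySem.List.pyGet? i 1
  pure ([x2, x0, x3, x1], [x3, x2, x1, x0], [x1, x3, x0, x2])

def pvLoopA : List (List Int) → PySem.Set (List Int) → Int → Option Int
  | [], _, count => some count
  | i :: rest, set1, count =>
    match pvRotsA i with
    | none => none
    | some (i2, i3, i4) =>
      let i1 := i
      if i1 ∉ set1 ∧ i2 ∉ set1 ∧ i3 ∉ set1 ∧ i4 ∉ set1 then
        pvLoopA rest ((((set1.add i1).add i2).add i3).add i4) (count + 1)
      else
        pvLoopA rest set1 count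

def count_different_matrices (matrices : List (List Int)) : Int :=
  -- first loop of A: 'tuple(i) not in matrices' compares a tuple with lists, which is never
  -- equal in Python, so the 'not in' branch always runs (the dictionary is never read).
  let _dictionary : PySem.Dict (List Int) Int :=
    matrices.foldl (fun d i => d.insert i 1) PySem.Dict.empty
  (pvLoopA matrices PySem.Set.empty 0).getD 0

-- ===== PORT B =====
-- Python's lexicographic tuple comparison on int tuples (exact for Int components)
def pvCmpL : List Int → List Int → Ordering
  | [], [] => .eq
  | [], _ :: _ => .lt
  | _ :: _, [] => .gt
  | a :: as, b :: bs =>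
    match compare a b with
    | .eq => pvCmpL as bs
    | o => o

-- Python's min of two/four arguments: keeps the earlier argument unless a later one is strictly smaller
def pvMin2 (a b : List Int) : List Int := if pvCmpL b a = .lt then b else a
def pvMin4 (a b c d : List Int) : List Int := pvMin2 (pvMin2 (pvMin2 a b) c) d

-- min of the four rotation tuples of B's loop body (same IndexError points as A's indexing)
def pvCanonRow? (i : List Int) : Option (List Int) := do
  let x0 ← PySem.List.pyGet? i 0
  let x1 ← PySem.List.pyGet? i 1
  let x2 ← PySem.List.pyGet? i 2
  let x3 ← PySem.List.pyGet? i 3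
  pure (pvMin4 [x0, x1, x2, x3] [x2, x0, x3, x1] [x3, x2, x1, x0] [x1, x3, x0, x2])

def pvLoopB : List (List Int) → PySem.Set (List Int) → Option (PySem.Set (List Int))
  | [], canon => some canon
  | i :: rest, canon =>
    match pvCanonRow? i with
    | none => none
    | some m => pvLoopB rest (canon.add m)

def count_different_matrices_alt (matrices : List (List Int)) : Int :=
  ((pvLoopB matrices PySem.Set.empty).map (fun s => (s.length : Int))).getD 0

-- ===== PRECONDITION & SPEC =====
-- Pre_ excludes exactly the inputs on which A raises IndexError (a row shorter than 4).
def Pre_count_different_matrices (matrices : List (List Int)) : Prop :=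
  ∀ row ∈ matrices, 4 ≤ row.length
instance (matrices : List (List Int)) : Decidable (Pre_count_different_matrices matrices) := by
  unfold Pre_count_different_matrices; infer_instance

def pvWitness_count_different_matrices : List (List Int) := [[1, 2, 3, 4], [3, 1, 4, 2], [1, 2, 3, 5]]

def Spec_count_different_matrices (matrices : List (List Int)) (out : Int) : Prop := out = count_different_matrices_alt matrices
instance (matrices : List (List Int)) (out : Int) : Decidable (Spec_count_different_matrices matrices out) := by unfold Spec_count_different_matrices; infer_instance

-- ===== CLAIM (what is proved, stated in full; the proofs are below) =====
def Claim_equal_count_different_matrices : Prop := ∀ (matrices : List (List Int)), Dom_count_different_matrices matrices → Pre_count_different_matrices matrices → Spec_count_different_matrices matrices (count_different_matrices matrices)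

-- ===== LEMMAS AND PROOFS =====

-- the 90° rotation on a flattened 2x2 matrix
def pvR : List Int → List Int
  | [a, b, c, d] => [c, a, d, b]
  | l => l

def pvCanon (x : List Int) : List Int := pvMin4 x (pvR x) (pvR (pvR x)) (pvR (pvR (pvR x)))

theorem pvCmpL_eq_iff (a b : List Int) : pvCmpL a b = .eq ↔ a = b := by
  induction a generalizing b with
  | nil => cases b <;> simp [pvCmpL]
  | cons x xs ih =>
    cases b with
    | nil => simp [pvCmpL]
    | cons y ys =>
      simp only [pvCmpL]
      rcases h : compare x y with h' | h' | h' <;>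
        simp_all [compare_lt_iff_lt, compare_gt_iff_gt]
      · intro h'; omega
      · intro h'; omega

theorem pvCmpL_swap (a b : List Int) : pvCmpL b a = (pvCmpL a b).swap := by
  induction a generalizing b with
  | nil => cases b <;> simp [pvCmpL]
  | cons x xs ih =>
    cases b with
    | nil => simp [pvCmpL]
    | cons y ys =>
      simp only [pvCmpL]
      rcases h : compare x y with h' | h' | h' <;>
        rw [show compare y x = (compare x y).swap from (Int.compare_swap x y) ▸ rfl] <;>
        simp [h, ih]

theorem pvCmpL_trans (a : List Int) : ∀ b c, pvCmpL a b = .lt → pvCmpL b c = .lt → pvCmpL a c = .lt := by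
  induction a with
  | nil => intro b c h1 h2; cases b <;> cases c <;> simp_all [pvCmpL]
  | cons x xs ih =>
    rintro (_ | ⟨y, ys⟩) c h1 h2
    · simp [pvCmpL] at h1
    · rcases c with _ | ⟨z, zs⟩
      · simp [pvCmpL] at h2
      · simp only [pvCmpL] at h1 h2 ⊢
        rcases hxy : compare x y with _ | _ | _ <;> rw [hxy] at h1 <;>
          rcases hyz : compare y z with _ | _ | _ <;> rw [hyz] at h2
        all_goals try dsimp only at h1 h2
        all_goals try exact absurd h1 (by decide)
        all_goals try exact absurd h2 (by decide)
        all_goals try rw [compare_lt_iff_lt] at hxy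
        all_goals try rw [compare_eq_iff_eq] at hxy
        all_goals try rw [compare_lt_iff_lt] at hyz
        all_goals try rw [compare_eq_iff_eq] at hyz
        all_goals try (rw [show compare x z = Ordering.lt by rw [compare_lt_iff_lt]; omega])
        rw [show compare x z = Ordering.eq by rw [compare_eq_iff_eq]; omega]
        exact ih _ _ h1 h2

theorem pvCmpL_refl (a : List Int) : pvCmpL a a = .eq := (pvCmpL_eq_iff a a).mpr rfl

theorem pvCmpL_gt_iff (a b : List Int) : pvCmpL a b = .gt ↔ pvCmpL b a = .lt := by
  rw [pvCmpL_swap b a]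
  rcases h : pvCmpL b a with _ | _ | _ <;> simp [Ordering.swap]

theorem pvMin2_eq_left {a b : List Int} (h : pvCmpL b a ≠ .lt) : pvMin2 a b = a := if_neg h
theorem pvMin2_eq_right {a b : List Int} (h : pvCmpL b a = .lt) : pvMin2 a b = b := if_pos h

theorem pvMin2_comm (a b : List Int) : pvMin2 a b = pvMin2 b a := by
  rcases h : pvCmpL a b with _ | _ | _
  · rw [pvMin2_eq_left (by simp [(pvCmpL_gt_iff b a).mpr h]), pvMin2_eq_right h]
  · rw [(pvCmpL_eq_iff a b).mp h]
  · rw [pvMin2_eq_right ((pvCmpL_gt_iff a b).mp h),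
        pvMin2_eq_left (by simp [h])]

theorem pvMin2_assoc (a b c : List Int) : pvMin2 (pvMin2 a b) c = pvMin2 a (pvMin2 b c) := by
  rcases hba : pvCmpL b a with _ | _ | _
  · -- b < a
    have hab : pvMin2 a b = b := pvMin2_eq_right hba
    rcases hcb : pvCmpL c b with _ | _ | _
    · have hbc : pvMin2 b c = c := pvMin2_eq_right hcb
      have hac : pvMin2 a c = c := pvMin2_eq_right (pvCmpL_trans _ _ _ hcb hba)
      rw [hab, hbc]; exact hac.symm
    · have hbc : pvMin2 b c = b := pvMin2_eq_left (by simp [hcb])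
      rw [hab, hbc]; exact hab.symm
    · have hbc : pvMin2 b c = b := pvMin2_eq_left (by simp [hcb])
      rw [hab, hbc]; exact hab.symm
  · -- b = a
    have e := (pvCmpL_eq_iff b a).mp hba
    subst e
    have hm : pvMin2 b b = b := pvMin2_eq_left (by simp [pvCmpL_refl])
    rw [hm]
    rcases hca : pvCmpL c b with _ | _ | _
    · have hc : pvMin2 b c = c := pvMin2_eq_right hca
      rw [hc]; exact hc.symm
    · have hc : pvMin2 b c = b := pvMin2_eq_left (by simp [hca])
      rw [hc]; exact hm.symm
    · have hc : pvMin2 b c = b := pvMin2_eq_left (by simp [hca])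
      rw [hc]; exact hm.symm
  · -- a < b
    have hm : pvMin2 a b = a := pvMin2_eq_left (by simp [hba])
    rcases hcb : pvCmpL c b with _ | _ | _
    · have hbc : pvMin2 b c = c := pvMin2_eq_right hcb
      rw [hm, hbc]
    · have e := (pvCmpL_eq_iff c b).mp hcb
      subst e
      have hcc : pvMin2 c c = c := pvMin2_eq_left (by simp [pvCmpL_refl])
      rw [hm, hcc, hm]
    · have hbc : pvMin2 b c = b := pvMin2_eq_left (by simp [hcb])
      have hac : pvMin2 a c = a := pvMin2_eq_left (by
        have h1 := (pvCmpL_gt_iff b a).mp hba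
        have h2 := (pvCmpL_gt_iff c b).mp hcb
        simp [(pvCmpL_gt_iff c a).mpr (pvCmpL_trans _ _ _ h1 h2)])
      rw [hm, hbc, hm]; exact hac

theorem pvMin2_left_comm (a b c : List Int) :
    pvMin2 a (pvMin2 b c) = pvMin2 b (pvMin2 a c) := by
  rw [← pvMin2_assoc, pvMin2_comm a b, pvMin2_assoc]

theorem pvMin4_cyclic (a b c d : List Int) : pvMin4 b c d a = pvMin4 a b c d := by
  unfold pvMin4
  rw [pvMin2_assoc, pvMin2_assoc, pvMin2_comm d a, pvMin2_left_comm c a,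
      pvMin2_left_comm b a, ← pvMin2_assoc, ← pvMin2_assoc]

theorem pvMin4_mem (a b c d : List Int) :
    pvMin4 a b c d = a ∨ pvMin4 a b c d = b ∨ pvMin4 a b c d = c ∨ pvMin4 a b c d = d := by
  unfold pvMin4 pvMin2; split_ifs <;> tauto

theorem pvR_len {x : List Int} (h : x.length = 4) : (pvR x).length = 4 := by
  match x, h with
  | [a, b, c, d], _ => rfl

theorem pvCanon_rot {x : List Int} (h : x.length = 4) : pvCanon (pvR x) = pvCanon x := by
  match x, h with
  | [a, b, c, d], _ =>
    simp only [pvCanon, pvR]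
    exact pvMin4_cyclic _ _ _ _

theorem pvCanon_rot2 {x : List Int} (h : x.length = 4) : pvCanon (pvR (pvR x)) = pvCanon x := by
  rw [pvCanon_rot (pvR_len h), pvCanon_rot h]

theorem pvCanon_rot3 {x : List Int} (h : x.length = 4) :
    pvCanon (pvR (pvR (pvR x))) = pvCanon x := by
  rw [pvCanon_rot (pvR_len (pvR_len h)), pvCanon_rot2 h]

-- orbits of length-4 rows intersect iff they share the canonical form
set_option maxHeartbeats 1000000 in
theorem pvCross {x i : List Int} (hx : x.length = 4) (hi : i.length = 4) :
    ((x = i ∨ x = pvR i ∨ x = pvR (pvR i) ∨ x = pvR (pvR (pvR i))) ∨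
     (pvR x = i ∨ pvR x = pvR i ∨ pvR x = pvR (pvR i) ∨ pvR x = pvR (pvR (pvR i))) ∨
     (pvR (pvR x) = i ∨ pvR (pvR x) = pvR i ∨ pvR (pvR x) = pvR (pvR i) ∨ pvR (pvR x) = pvR (pvR (pvR i))) ∨
     (pvR (pvR (pvR x)) = i ∨ pvR (pvR (pvR x)) = pvR i ∨ pvR (pvR (pvR x)) = pvR (pvR i) ∨ pvR (pvR (pvR x)) = pvR (pvR (pvR i))))
    ↔ pvCanon x = pvCanon i := by
  have e1 := pvCanon_rot hx; have e2 := pvCanon_rot2 hx; have e3 := pvCanon_rot3 hx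
  have f1 := pvCanon_rot hi; have f2 := pvCanon_rot2 hi; have f3 := pvCanon_rot3 hi
  constructor
  · intro h
    rcases h with (h|h|h|h)|(h|h|h|h)|(h|h|h|h)|(h|h|h|h) <;>
      simpa only [e1, e2, e3, f1, f2, f3] using congrArg pvCanon h
  · intro h
    rcases pvMin4_mem x (pvR x) (pvR (pvR x)) (pvR (pvR (pvR x))) with h1|h1|h1|h1 <;>
      rcases pvMin4_mem i (pvR i) (pvR (pvR i)) (pvR (pvR (pvR i))) with h2|h2|h2|h2 <;>
      · have e := ((show pvCanon x = _ from h1).symm.trans h).trans (show pvCanon i = _ from h2)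
        first
          | exact Or.inl (Or.inl e)
          | exact Or.inl (Or.inr (Or.inl e))
          | exact Or.inl (Or.inr (Or.inr (Or.inl e)))
          | exact Or.inl (Or.inr (Or.inr (Or.inr e)))
          | exact Or.inr (Or.inl (Or.inl e))
          | exact Or.inr (Or.inl (Or.inr (Or.inl e)))
          | exact Or.inr (Or.inl (Or.inr (Or.inr (Or.inl e))))
          | exact Or.inr (Or.inl (Or.inr (Or.inr (Or.inr e))))
          | exact Or.inr (Or.inr (Or.inl (Or.inl e)))
          | exact Or.inr (Or.inr (Or.inl (Or.inr (Or.inl e))))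
          | exact Or.inr (Or.inr (Or.inl (Or.inr (Or.inr (Or.inl e)))))
          | exact Or.inr (Or.inr (Or.inl (Or.inr (Or.inr (Or.inr e)))))
          | exact Or.inr (Or.inr (Or.inr (Or.inl e)))
          | exact Or.inr (Or.inr (Or.inr (Or.inr (Or.inl e))))
          | exact Or.inr (Or.inr (Or.inr (Or.inr (Or.inr (Or.inl e)))))
          | exact Or.inr (Or.inr (Or.inr (Or.inr (Or.inr (Or.inr e)))))

-- the rotation helpers succeed on a length-4 row and produce the pvR powers
theorem pvR4 {x : List Int} (h : x.length = 4) : pvR (pvR (pvR (pvR x))) = x := by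
  match x, h with
  | [a, b, c, d], _ => rfl

-- the first four entries of a row (the part of a row A's rotations actually use)
def pvFirst4 : List Int → List Int
  | a :: b :: c :: d :: _ => [a, b, c, d]
  | l => l

-- the rotation helpers succeed on any row of length ≥ 4 and only look at its first four entries
theorem pvRotsA_eq (a b c d : Int) (t : List Int) :
    pvRotsA (a :: b :: c :: d :: t) = some ([c, a, d, b], [d, c, b, a], [b, d, a, c]) := by
  have g1 := PySem.List.pyGet?_ofNat (xs := a :: b :: c :: d :: t) (n := 1) (by simp)
  have g2 := PySem.List.pyGet?_ofNat (xs := a :: b :: c :: d :: t) (n := 2) (by simp)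
  have g3 := PySem.List.pyGet?_ofNat (xs := a :: b :: c :: d :: t) (n := 3) (by simp)
  norm_num at g1 g2 g3
  simp [pvRotsA, g1, g2, g3]

theorem pvCanonRow?_eq (a b c d : Int) (t : List Int) :
    pvCanonRow? (a :: b :: c :: d :: t) =
      some (pvMin4 [a, b, c, d] [c, a, d, b] [d, c, b, a] [b, d, a, c]) := by
  have g1 := PySem.List.pyGet?_ofNat (xs := a :: b :: c :: d :: t) (n := 1) (by simp)
  have g2 := PySem.List.pyGet?_ofNat (xs := a :: b :: c :: d :: t) (n := 2) (by simp)
  have g3 := PySem.List.pyGet?_ofNat (xs := a :: b :: c :: d :: t) (n := 3) (by simp)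
  norm_num at g1 g2 g3
  simp [pvCanonRow?, g1, g2, g3]

-- a row's four new set1 entries meet a later row's four lookups iff the first-4 prefixes
-- are rotation-equivalent, i.e. share the canonical form
set_option maxHeartbeats 1000000 in
theorem pvNew {x : List Int} (hx : 4 ≤ x.length) (a b c d : Int) (tail : List Int) :
    ((x = a :: b :: c :: d :: tail ∨ x = [c, a, d, b] ∨ x = [d, c, b, a] ∨ x = [b, d, a, c]) ∨
     (pvR (pvFirst4 x) = a :: b :: c :: d :: tail ∨ pvR (pvFirst4 x) = [c, a, d, b] ∨
      pvR (pvFirst4 x) = [d, c, b, a] ∨ pvR (pvFirst4 x) = [b, d, a, c]) ∨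
     (pvR (pvR (pvFirst4 x)) = a :: b :: c :: d :: tail ∨ pvR (pvR (pvFirst4 x)) = [c, a, d, b] ∨
      pvR (pvR (pvFirst4 x)) = [d, c, b, a] ∨ pvR (pvR (pvFirst4 x)) = [b, d, a, c]) ∨
     (pvR (pvR (pvR (pvFirst4 x))) = a :: b :: c :: d :: tail ∨ pvR (pvR (pvR (pvFirst4 x))) = [c, a, d, b] ∨
      pvR (pvR (pvR (pvFirst4 x))) = [d, c, b, a] ∨ pvR (pvR (pvR (pvFirst4 x))) = [b, d, a, c]))
    ↔ pvCanon (pvFirst4 x) = pvCanon [a, b, c, d] := by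
  obtain ⟨p, q, r0, s0, hT⟩ : ∃ p q r0 s0, pvFirst4 x = [p, q, r0, s0] := by
    match x, hx with
    | a' :: b' :: c' :: d' :: t', _ => exact ⟨a', b', c', d', rfl⟩
  rw [hT]
  have eL1 : pvCanon [r0, p, s0, q] = pvCanon [p, q, r0, s0] := pvCanon_rot (x := [p, q, r0, s0]) rfl
  have eL2 : pvCanon [s0, r0, q, p] = pvCanon [p, q, r0, s0] := pvCanon_rot2 (x := [p, q, r0, s0]) rfl
  have eL3 : pvCanon [q, s0, p, r0] = pvCanon [p, q, r0, s0] := pvCanon_rot3 (x := [p, q, r0, s0]) rfl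
  have f1 : pvCanon [c, a, d, b] = pvCanon [a, b, c, d] := pvCanon_rot (x := [a, b, c, d]) rfl
  have f2 : pvCanon [d, c, b, a] = pvCanon [a, b, c, d] := pvCanon_rot2 (x := [a, b, c, d]) rfl
  have f3 : pvCanon [b, d, a, c] = pvCanon [a, b, c, d] := pvCanon_rot3 (x := [a, b, c, d]) rfl
  have eT4 : pvR (pvR (pvR (pvR [p, q, r0, s0]))) = [p, q, r0, s0] := pvR4 (x := [p, q, r0, s0]) rfl
  have hRt1 : pvR [a, b, c, d] = [c, a, d, b] := rfl
  have hRt2 : pvR [c, a, d, b] = [d, c, b, a] := rfl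
  have hRt3 : pvR [d, c, b, a] = [b, d, a, c] := rfl
  have hRt4 : pvR [b, d, a, c] = [a, b, c, d] := rfl
  have hF4 : ∀ (u v w z : Int) (l : List Int), pvFirst4 (u :: v :: w :: z :: l) = [u, v, w, z] :=
    fun _ _ _ _ _ => rfl
  have hRp1 : pvR [p, q, r0, s0] = [r0, p, s0, q] := rfl
  have hRp2 : pvR [r0, p, s0, q] = [s0, r0, q, p] := rfl
  have hRp3 : pvR [s0, r0, q, p] = [q, s0, p, r0] := rfl
  constructor
  · intro h
    rcases h with (h|h|h|h)|(h|h|h|h)|(h|h|h|h)|(h|h|h|h) <;>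
      simpa only [hRp1, hRp2, hRp3, hF4, hT, eL1, eL2, eL3, f1, f2, f3]
        using congrArg pvCanon (congrArg pvFirst4 h)
  · intro h
    rcases (pvCross (show ([p, q, r0, s0] : List Int).length = 4 from rfl)
        (show ([a, b, c, d] : List Int).length = 4 from rfl)).mpr h with
      (h|h|h|h)|(h|h|h|h)|(h|h|h|h)|(h|h|h|h)
    · have h2 := h
      have h2 := congrArg pvR h2
      rw [hRt1] at h2
      exact Or.inr (Or.inl (Or.inr (Or.inl (h2))))
    · have h2 := h
      have h2 := congrArg pvR h2
      rw [hRt1, hRt2] at h2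
      exact Or.inr (Or.inl (Or.inr (Or.inr (Or.inl (h2)))))
    · have h2 := h
      have h2 := congrArg pvR h2
      rw [hRt1, hRt2, hRt3] at h2
      exact Or.inr (Or.inl (Or.inr (Or.inr (Or.inr (h2)))))
    · have h2 := h
      have h2 := congrArg pvR h2
      have h2 := congrArg pvR h2
      rw [hRt1, hRt2, hRt3, hRt4, hRt1] at h2
      exact Or.inr (Or.inr (Or.inl (Or.inr (Or.inl (h2)))))
    · have h2 := h
      have h2 := congrArg pvR h2
      rw [hRt1] at h2
      exact Or.inr (Or.inr (Or.inl (Or.inr (Or.inl (h2)))))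
    · have h2 := h
      have h2 := congrArg pvR h2
      rw [hRt1, hRt2] at h2
      exact Or.inr (Or.inr (Or.inl (Or.inr (Or.inr (Or.inl (h2))))))
    · have h2 := h
      have h2 := congrArg pvR h2
      rw [hRt1, hRt2, hRt3] at h2
      exact Or.inr (Or.inr (Or.inl (Or.inr (Or.inr (Or.inr (h2))))))
    · have h2 := h
      have h2 := congrArg pvR h2
      have h2 := congrArg pvR h2
      rw [hRt1, hRt2, hRt3, hRt4, hRt1] at h2
      exact Or.inr (Or.inr (Or.inr (Or.inr (Or.inl (h2)))))
    · have h2 := h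
      have h2 := congrArg pvR h2
      rw [hRt1] at h2
      exact Or.inr (Or.inr (Or.inr (Or.inr (Or.inl (h2)))))
    · have h2 := h
      have h2 := congrArg pvR h2
      rw [hRt1, hRt2] at h2
      exact Or.inr (Or.inr (Or.inr (Or.inr (Or.inr (Or.inl (h2))))))
    · have h2 := h
      have h2 := congrArg pvR h2
      rw [hRt1, hRt2, hRt3] at h2
      exact Or.inr (Or.inr (Or.inr (Or.inr (Or.inr (Or.inr (h2))))))
    · have h2 := h
      have h2 := congrArg pvR h2
      have h2 := congrArg pvR h2
      have h2 := congrArg pvR h2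
      rw [eT4] at h2
      rw [hRt1, hRt2, hRt3, hRt4, hRt1, hRt2] at h2
      exact Or.inr (Or.inl (Or.inr (Or.inr (Or.inl (h2)))))
    · have h2 := h
      have h2 := congrArg pvR h2
      have h2 := congrArg pvR h2
      rw [eT4] at h2
      rw [hRt1, hRt2] at h2
      exact Or.inr (Or.inl (Or.inr (Or.inr (Or.inl (h2)))))
    · have h2 := h
      have h2 := congrArg pvR h2
      have h2 := congrArg pvR h2
      rw [eT4] at h2
      rw [hRt1, hRt2, hRt3] at h2
      exact Or.inr (Or.inl (Or.inr (Or.inr (Or.inr (h2)))))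
    · have h2 := h
      have h2 := congrArg pvR h2
      have h2 := congrArg pvR h2
      have h2 := congrArg pvR h2
      rw [eT4] at h2
      rw [hRt1, hRt2, hRt3, hRt4, hRt1] at h2
      exact Or.inr (Or.inr (Or.inl (Or.inr (Or.inl (h2)))))
    · have h2 := h
      have h2 := congrArg pvR h2
      have h2 := congrArg pvR h2
      rw [eT4] at h2
      rw [hRt1, hRt2, hRt3, hRt4, hRt1] at h2
      exact Or.inr (Or.inl (Or.inr (Or.inl (h2))))

theorem pvSet_add_of_mem {s : PySem.Set (List Int)} {x : List Int} (h : x ∈ s) :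
    s.add x = s := by
  simp [PySem.Set.add, h]

theorem pvSet_add_len_of_not_mem {s : PySem.Set (List Int)} {x : List Int} (h : x ∉ s) :
    (s.add x).length = s.length + 1 := by
  simp [PySem.Set.add, h]

def pvInv (set1 canon : PySem.Set (List Int)) (count : Int) : Prop :=
  count = (canon.length : Int) ∧
  ∀ x : List Int, 4 ≤ x.length →
    ((x ∈ set1 ∨ pvR (pvFirst4 x) ∈ set1 ∨ pvR (pvR (pvFirst4 x)) ∈ set1 ∨
      pvR (pvR (pvR (pvFirst4 x))) ∈ set1) ↔ pvCanon (pvFirst4 x) ∈ canon)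

set_option maxHeartbeats 1000000 in
theorem pvLoop_eq (ms : List (List Int)) :
    ∀ set1 canon count, (∀ row ∈ ms, 4 ≤ row.length) → pvInv set1 canon count →
      pvLoopA ms set1 count = (pvLoopB ms canon).map (fun s => (s.length : Int)) := by
  induction ms with
  | nil => intro set1 canon count _ hInv; simp [pvLoopA, pvLoopB, hInv.1]
  | cons i rest ih =>
    intro set1 canon count hlen hInv
    have hi : 4 ≤ i.length := hlen i (List.mem_cons_self ..)
    obtain ⟨a, b, c, d, tail, rfl⟩ : ∃ a b c d tail, i = a :: b :: c :: d :: tail := by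
      match i, hi with
      | a :: b :: c :: d :: t, _ => exact ⟨a, b, c, d, t, rfl⟩
    have hrest : ∀ row ∈ rest, 4 ≤ row.length := fun r hr => hlen r (List.mem_cons_of_mem _ hr)
    rw [pvLoopA, pvLoopB, pvRotsA_eq, pvCanonRow?_eq]
    dsimp only
    have hF : pvFirst4 (a :: b :: c :: d :: tail) = [a, b, c, d] := rfl
    have hR1 : pvR [a, b, c, d] = [c, a, d, b] := rfl
    have hR2 : pvR (pvR [a, b, c, d]) = [d, c, b, a] := rfl
    have hR3 : pvR (pvR (pvR [a, b, c, d])) = [b, d, a, c] := rfl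
    have hmin : pvMin4 [a, b, c, d] [c, a, d, b] [d, c, b, a] [b, d, a, c] = pvCanon [a, b, c, d] := rfl
    have hiff := hInv.2 (a :: b :: c :: d :: tail) (by simp only [List.length_cons]; omega)
    rw [hF, hR3, hR2, hR1] at hiff
    by_cases hcond : (a :: b :: c :: d :: tail) ∉ set1 ∧ [c,a,d,b] ∉ set1 ∧ [d,c,b,a] ∉ set1 ∧ [b,d,a,c] ∉ set1
    · rw [if_pos hcond, hmin]
      have hnc : pvCanon [a, b, c, d] ∉ canon := by
        intro hmem
        rcases hiff.mpr hmem with h|h|h|h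
        exacts [hcond.1 h, hcond.2.1 h, hcond.2.2.1 h, hcond.2.2.2 h]
      apply ih _ _ _ hrest
      constructor
      · rw [pvSet_add_len_of_not_mem hnc]; push_cast; rw [hInv.1]
      · intro x hx
        have hkey := pvNew hx a b c d tail
        have hbase := hInv.2 x hx
        simp only [PySem.Set.mem_add]
        constructor
        · intro h
          rcases h with ((((h|h)|h)|h)|h)|((((h|h)|h)|h)|h)|((((h|h)|h)|h)|h)|((((h|h)|h)|h)|h)
          exacts [Or.inl (hbase.mp (Or.inl (h))),
                  Or.inr (hkey.mp (Or.inl (Or.inl (h)))),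
                  Or.inr (hkey.mp (Or.inl (Or.inr (Or.inl (h))))),
                  Or.inr (hkey.mp (Or.inl (Or.inr (Or.inr (Or.inl (h)))))),
                  Or.inr (hkey.mp (Or.inl (Or.inr (Or.inr (Or.inr (h)))))),
                  Or.inl (hbase.mp (Or.inr (Or.inl (h)))),
                  Or.inr (hkey.mp (Or.inr (Or.inl (Or.inl (h))))),
                  Or.inr (hkey.mp (Or.inr (Or.inl (Or.inr (Or.inl (h)))))),
                  Or.inr (hkey.mp (Or.inr (Or.inl (Or.inr (Or.inr (Or.inl (h))))))),
                  Or.inr (hkey.mp (Or.inr (Or.inl (Or.inr (Or.inr (Or.inr (h))))))),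
                  Or.inl (hbase.mp (Or.inr (Or.inr (Or.inl (h))))),
                  Or.inr (hkey.mp (Or.inr (Or.inr (Or.inl (Or.inl (h)))))),
                  Or.inr (hkey.mp (Or.inr (Or.inr (Or.inl (Or.inr (Or.inl (h))))))),
                  Or.inr (hkey.mp (Or.inr (Or.inr (Or.inl (Or.inr (Or.inr (Or.inl (h)))))))),
                  Or.inr (hkey.mp (Or.inr (Or.inr (Or.inl (Or.inr (Or.inr (Or.inr (h)))))))),
                  Or.inl (hbase.mp (Or.inr (Or.inr (Or.inr (h))))),
                  Or.inr (hkey.mp (Or.inr (Or.inr (Or.inr (Or.inl (h)))))),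
                  Or.inr (hkey.mp (Or.inr (Or.inr (Or.inr (Or.inr (Or.inl (h))))))),
                  Or.inr (hkey.mp (Or.inr (Or.inr (Or.inr (Or.inr (Or.inr (Or.inl (h)))))))),
                  Or.inr (hkey.mp (Or.inr (Or.inr (Or.inr (Or.inr (Or.inr (Or.inr (h))))))))]
        · intro h
          rcases h with h | h
          · rcases hbase.mpr h with h|h|h|h
            exacts [Or.inl (Or.inl (Or.inl (Or.inl (Or.inl (h))))),
                    Or.inr (Or.inl (Or.inl (Or.inl (Or.inl (Or.inl (h)))))),
                    Or.inr (Or.inr (Or.inl (Or.inl (Or.inl (Or.inl (Or.inl (h))))))),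
                    Or.inr (Or.inr (Or.inr (Or.inl (Or.inl (Or.inl (Or.inl (h)))))))]
          · rcases hkey.mpr h with (h|h|h|h)|(h|h|h|h)|(h|h|h|h)|(h|h|h|h)
            exacts [Or.inl (Or.inl (Or.inl (Or.inl (Or.inr (h))))),
                    Or.inl (Or.inl (Or.inl (Or.inr (h)))),
                    Or.inl (Or.inl (Or.inr (h))),
                    Or.inl (Or.inr (h)),
                    Or.inr (Or.inl (Or.inl (Or.inl (Or.inl (Or.inr (h)))))),
                    Or.inr (Or.inl (Or.inl (Or.inl (Or.inr (h))))),
                    Or.inr (Or.inl (Or.inl (Or.inr (h)))),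
                    Or.inr (Or.inl (Or.inr (h))),
                    Or.inr (Or.inr (Or.inl (Or.inl (Or.inl (Or.inl (Or.inr (h))))))),
                    Or.inr (Or.inr (Or.inl (Or.inl (Or.inl (Or.inr (h)))))),
                    Or.inr (Or.inr (Or.inl (Or.inl (Or.inr (h))))),
                    Or.inr (Or.inr (Or.inl (Or.inr (h)))),
                    Or.inr (Or.inr (Or.inr (Or.inl (Or.inl (Or.inl (Or.inr (h))))))),
                    Or.inr (Or.inr (Or.inr (Or.inl (Or.inl (Or.inr (h)))))),
                    Or.inr (Or.inr (Or.inr (Or.inl (Or.inr (h))))),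
                    Or.inr (Or.inr (Or.inr (Or.inr (h))))]
    · rw [if_neg hcond, hmin]
      have hc : pvCanon [a, b, c, d] ∈ canon := by
        apply hiff.mp
        by_cases h1 : (a :: b :: c :: d :: tail) ∈ set1
        · exact Or.inl h1
        by_cases h2 : ([c,a,d,b] : List Int) ∈ set1
        · exact Or.inr (Or.inl h2)
        by_cases h3 : ([d,c,b,a] : List Int) ∈ set1
        · exact Or.inr (Or.inr (Or.inl h3))
        by_cases h4 : ([b,d,a,c] : List Int) ∈ set1
        · exact Or.inr (Or.inr (Or.inr h4))
        · exact absurd ⟨h1, h2, h3, h4⟩ hcond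
      rw [pvSet_add_of_mem hc]
      exact ih _ _ _ hrest hInv

-- ===== VERDICT (by name: the statement is the Claim_ definition above) =====
theorem count_different_matrices_spec : Claim_equal_count_different_matrices := by
  intro matrices _ hpre
  unfold Spec_count_different_matrices count_different_matrices count_different_matrices_alt
  have h := pvLoop_eq matrices PySem.Set.empty PySem.Set.empty 0 hpre
    ⟨rfl, by intro x _; simp [PySem.Set.empty]⟩
  rw [h]
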